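-- pv_equiv track=rewrite | github.com/ESMValGroup/ESMValTool | esmvaltool/diag_scripts/weathertyping/weathertyping.py | get_mapping_dict
-- ===== SOURCE A (Python) =====
-- def turn_set_to_mapping_dict(array):
--
--     result_dict = {}
--
--     for i, s in enumerate(array):
--         for elem in s:
--             if elem not in result_dict:
--                 result_dict[elem] = i+1
--             else:
--                 result_dict[elem].append(i)
--
--     return result_dict
--
-- def get_mapping_dict(selected_pairs):
--
--     mapping_dict_douglas_paper = {
--             1: 1, 2: 1, 19: 1,
--             3: 2, 4: 2, 22: 2, 21: 2,
--             5: 3, 6: 3, 15: 3, 16: 3,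
--             7: 4, 8: 4, 11: 4, 18: 4,
--             9: 5, 17: 5,
--             10: 6, 20: 6,
--             12: 7, 13: 7, 14: 7,
--             23: 8, 24: 8,
--             25: 9, 26: 9, 27:27, 0:0
--         }
--
--     mapping_array = []
--
--     for i in range(0,len(selected_pairs)):
--         mapping_array.append(selected_pairs[i][0])
--
--     s=[set(i) for i in mapping_array if i]
--
--     def find_intersection(m_list):
--         for i,v in enumerate(m_list) :
--             for j,k in enumerate(m_list[i+1:],i+1):
--                 if v&k:
--                     s[i]=v.union(m_list.pop(j))
--                     return find_intersection(m_list)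
--         return m_list
--
--     merged_tuples = find_intersection(s)
--
--     mapping_dict = turn_set_to_mapping_dict(merged_tuples)
--
--     return mapping_dict
-- ===== SOURCE B (Python) =====
-- def get_mapping_dict(selected_pairs):
--     sets = [list(dict.fromkeys(sp[0])) for sp in selected_pairs if sp[0]]
--     result = {}
--     comp = 1
--     while sets:
--         acc, rest = sets[0], sets[1:]
--         seen = set(acc)
--         while True:
--             hit = next((j for j, t in enumerate(rest) if not seen.isdisjoint(t)), None)
--             if hit is None:
--                 break
--             for x in rest.pop(hit):
--                 if x not in seen:
--                     seen.add(x)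
--                     acc.append(x)
--         for x in acc:
--             result.setdefault(x, comp)
--         comp += 1
--         sets = rest
--     return result
-- ===== Notes on version B (the rewrite author's own statement) =====
-- stated objective: alternative
-- what changed: B replaces A's recursive find_intersection (which rescans all pairs of sets from scratch after every single merge) by a single left-to-right pass that grows one component at a time with a maintained 'seen' set and emits it immediately, so finished components are never rescanned.
-- outside the precondition, e.g. on get_mapping_dict([[], [[1]]]): A raises IndexError, B raises IndexError
import Mathlib
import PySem

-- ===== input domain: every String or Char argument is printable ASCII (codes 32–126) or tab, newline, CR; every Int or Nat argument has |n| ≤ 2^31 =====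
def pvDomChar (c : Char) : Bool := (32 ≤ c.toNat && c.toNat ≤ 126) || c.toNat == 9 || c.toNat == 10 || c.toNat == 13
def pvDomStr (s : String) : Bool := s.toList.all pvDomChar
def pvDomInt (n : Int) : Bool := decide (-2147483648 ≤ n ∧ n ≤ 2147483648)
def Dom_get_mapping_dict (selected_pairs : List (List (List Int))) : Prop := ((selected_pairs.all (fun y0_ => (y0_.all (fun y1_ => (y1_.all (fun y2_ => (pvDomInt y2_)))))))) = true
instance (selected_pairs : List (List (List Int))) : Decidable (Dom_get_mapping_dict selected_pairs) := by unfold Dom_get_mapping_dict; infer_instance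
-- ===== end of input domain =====

-- B merges the intersecting sets component by component (grow one accumulator, emit, move on)
-- instead of A's restart-from-scratch recursive pair scan over all sets; same resulting dict.

-- ===== PORT A =====
-- inner loop of find_intersection: first k after v with v & k nonempty; returns (v ∪ k, rest with k popped)
def pvInnerScanA (v : PySem.Set Int) : List (PySem.Set Int) → Option (PySem.Set Int × List (PySem.Set Int))
  | [] => none
  | k :: ks =>
    if PySem.Set.inter v k ≠ [] then some (PySem.Set.union v k, ks)
    else (pvInnerScanA v ks).map (fun p => (p.1, k :: p.2))

-- outer loop of find_intersection: first lexicographic pair (i, j) that intersects, merged in place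
def pvOuterScanA : List (PySem.Set Int) → Option (List (PySem.Set Int))
  | [] => none
  | v :: rest =>
    match pvInnerScanA v rest with
    | some (u, rest') => some (u :: rest')
    | none => (pvOuterScanA rest).map (fun r => v :: r)

-- find_intersection: repeat the scan until no pair intersects.
-- fuel is a totality guard only: every step drops one set, so m.length steps always suffice.
def pvFindIntersectionGo : Nat → List (PySem.Set Int) → List (PySem.Set Int)
  | 0, m => m
  | fuel + 1, m =>
    match pvOuterScanA m with
    | some m' => pvFindIntersectionGo fuel m'
    | none => m

def pvFindIntersection (m : List (PySem.Set Int)) : List (PySem.Set Int) :=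
  pvFindIntersectionGo m.length m

def turn_set_to_mapping_dict (array : List (PySem.Set Int)) : PySem.Dict Int Int :=
  (PySem.List.enumerate array 0).foldl
    (fun rd p =>
      p.2.foldl
        (fun rd elem =>
          if !(PySem.Dict.contains rd elem) then PySem.Dict.insert rd elem (p.1 + 1)
          -- Python's else branch ('result_dict[elem].append(i)') raises AttributeError on an int;
          -- it is unreachable here: the merged sets are pairwise disjoint and duplicate-free.
          else rd)
        rd)
    PySem.Dict.empty

def get_mapping_dict (selected_pairs : List (List (List Int))) : List (Int × Int) :=
  -- (the literal mapping_dict_douglas_paper of A is built and never used; not ported)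
  let mapping_array : List (List Int) :=
    (PySem.List.pyRange 0 (PySem.List.len selected_pairs) 1).foldl
      (fun acc i => acc ++ [PySem.List.pyGetD (PySem.List.pyGetD selected_pairs i []) 0 []]) []
      -- selected_pairs[i][0]; the inner IndexError (an empty pair list) is excluded by Pre_
  let s : List (PySem.Set Int) :=
    (mapping_array.filter (fun i => !i.isEmpty)).map PySem.Set.ofList
  (turn_set_to_mapping_dict (pvFindIntersection s)).items

-- ===== PORT B =====
-- next((j for j, t in enumerate(rest) if not seen.isdisjoint(t)), None)
def pvHit (seen : PySem.Set Int) : List (List Int) → Option Nat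
  | [] => none
  | t :: ts =>
    if PySem.Set.isdisjoint seen t then (pvHit seen ts).map (· + 1) else some 0

-- the inner while loop: absorb the first list sharing an element, restart, until none does.
-- fuel is a totality guard only: every step pops one list, so rest.length steps always suffice.
def pvGrowGo : Nat → List Int → PySem.Set Int → List (List Int) → List Int × List (List Int)
  | 0, acc, _, rest => (acc, rest)
  | fuel + 1, acc, seen, rest =>
    match pvHit seen rest with
    | none => (acc, rest)
    | some j =>
      match PySem.List.pop? rest (j : Int) with
      | none => (acc, rest)   -- unreachable: pvHit returns an in-range index
      | some (t, rest') =>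
        let p := t.foldl
          (fun (sa : List Int × PySem.Set Int) x =>
            if sa.2.contains x then sa else (sa.1 ++ [x], sa.2.add x)) (acc, seen)
        pvGrowGo fuel p.1 p.2 rest'

def pvGrow (acc : List Int) (seen : PySem.Set Int) (rest : List (List Int)) :
    List Int × List (List Int) :=
  pvGrowGo rest.length acc seen rest

-- the outer while loop: one component per pass, numbered 1, 2, …
-- fuel is a totality guard only: every pass consumes at least the head set.
def pvCompLoopGo : Nat → PySem.Dict Int Int → Int → List (List Int) → PySem.Dict Int Int
  | 0, result, _, _ => result
  | fuel + 1, result, comp, sets =>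
    match sets with
    | [] => result
    | a :: rest =>
      let g := pvGrow a (PySem.Set.ofList a) rest
      pvCompLoopGo fuel (g.1.foldl (fun d x => PySem.Dict.setdefault d x comp) result)
        (comp + 1) g.2

def pvCompLoop (result : PySem.Dict Int Int) (comp : Int) (sets : List (List Int)) :
    PySem.Dict Int Int :=
  pvCompLoopGo sets.length result comp sets

def get_mapping_dict_alt (selected_pairs : List (List (List Int))) : List (Int × Int) :=
  let sets : List (List Int) :=
    (selected_pairs.filter (fun sp => !(PySem.List.pyGetD sp 0 []).isEmpty)).map
      (fun sp => PySem.List.dedup (PySem.List.pyGetD sp 0 []))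
      -- sp[0]; the IndexError on an empty sp is excluded by Pre_
  (pvCompLoop PySem.Dict.empty 1 sets).items

-- ===== PRECONDITION & SPEC =====
-- Pre_ excludes inputs containing an empty pair list, on which A (selected_pairs[i][0]) raises IndexError.
def Pre_get_mapping_dict (selected_pairs : List (List (List Int))) : Prop :=
  ∀ p ∈ selected_pairs, p ≠ []
instance (selected_pairs : List (List (List Int))) : Decidable (Pre_get_mapping_dict selected_pairs) := by
  unfold Pre_get_mapping_dict; infer_instance

def pvWitness_get_mapping_dict : List (List (List Int)) := [[[1], [5]], [[2, 1]], [[3]]]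

def Spec_get_mapping_dict (selected_pairs : List (List (List Int))) (out : List (Int × Int)) : Prop := out = get_mapping_dict_alt selected_pairs
instance (selected_pairs : List (List (List Int))) (out : List (Int × Int)) : Decidable (Spec_get_mapping_dict selected_pairs out) := by unfold Spec_get_mapping_dict; infer_instance

-- ===== CLAIM (what is proved, stated in full; the proofs are below) =====
def Claim_equal_get_mapping_dict : Prop := ∀ (selected_pairs : List (List (List Int))), Dom_get_mapping_dict selected_pairs → Pre_get_mapping_dict selected_pairs → Spec_get_mapping_dict selected_pairs (get_mapping_dict selected_pairs)

-- ===== LEMMAS AND PROOFS =====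

theorem pvInnerScanA_length (v : PySem.Set Int) (rest : List (PySem.Set Int))
    (p : PySem.Set Int × List (PySem.Set Int)) (h : pvInnerScanA v rest = some p) :
    p.2.length + 1 = rest.length := by
  induction rest generalizing p with
  | nil => simp [pvInnerScanA] at h
  | cons k ks ih =>
    simp only [pvInnerScanA] at h
    split at h
    · cases h; rfl
    · cases hk : pvInnerScanA v ks with
      | none => rw [hk] at h; simp at h
      | some q =>
        rw [hk] at h; cases h
        have := ih q hk
        simp only [List.length_cons]
        omega

theorem pvOuterScanA_length (m m' : List (PySem.Set Int)) (h : pvOuterScanA m = some m') :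
    m'.length + 1 = m.length := by
  induction m generalizing m' with
  | nil => simp [pvOuterScanA] at h
  | cons v rest ih =>
    simp only [pvOuterScanA] at h
    cases hi : pvInnerScanA v rest with
    | some p =>
      rw [hi] at h; cases h
      have := pvInnerScanA_length v rest p hi
      simp only [List.length_cons]
      omega
    | none =>
      rw [hi] at h
      cases ho : pvOuterScanA rest with
      | none => rw [ho] at h; simp at h
      | some r =>
        rw [ho] at h; cases h
        have := ih r ho
        simp only [List.length_cons]
        omega

theorem pvHit_lt (seen : PySem.Set Int) (rest : List (List Int)) (j : Nat)
    (h : pvHit seen rest = some j) : j < rest.length := by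
  induction rest generalizing j with
  | nil => simp [pvHit] at h
  | cons t ts ih =>
    simp only [pvHit] at h
    split at h
    · cases hk : pvHit seen ts with
      | none => rw [hk] at h; simp at h
      | some q =>
        rw [hk] at h; simp at h
        have := ih q hk
        simp only [List.length_cons]
        omega
    · injection h with h
      subst h
      simp only [List.length_cons]
      omega


-- Proof-side view of A's merging: grow the head set by A's inner scan until it
-- intersects nothing, emit it, continue with the remainder.
def pvGrowS (v : PySem.Set Int) (rest : List (PySem.Set Int)) :
    PySem.Set Int × List (PySem.Set Int) :=
  match h : pvInnerScanA v rest with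
  | some p => pvGrowS p.1 p.2
  | none => (v, rest)
termination_by rest.length
decreasing_by have := pvInnerScanA_length v rest p h; omega

theorem pvGrowS_none {v : PySem.Set Int} {rest : List (PySem.Set Int)}
    (h : pvInnerScanA v rest = none) : pvGrowS v rest = (v, rest) := by
  rw [pvGrowS]
  split
  · next p hp => rw [h] at hp; cases hp
  · rfl

theorem pvGrowS_some {v : PySem.Set Int} {rest : List (PySem.Set Int)}
    {p : PySem.Set Int × List (PySem.Set Int)} (h : pvInnerScanA v rest = some p) :
    pvGrowS v rest = pvGrowS p.1 p.2 := by
  rw [pvGrowS]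
  split
  · next q hq => rw [h] at hq; cases hq; rfl
  · next hq => rw [h] at hq; cases hq

theorem pvGrowS_len (v : PySem.Set Int) (rest : List (PySem.Set Int)) :
    (pvGrowS v rest).2.length ≤ rest.length := by
  induction v, rest using pvGrowS.induct with
  | case1 v rest p h ih =>
    rw [pvGrowS_some h]
    have := pvInnerScanA_length v rest p h
    omega
  | case2 v rest h => rw [pvGrowS_none h]

def pvGreedy : List (PySem.Set Int) → List (PySem.Set Int)
  | [] => []
  | v :: rest => (pvGrowS v rest).1 :: pvGreedy (pvGrowS v rest).2
termination_by m => m.length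
decreasing_by have := pvGrowS_len v rest; simp only [List.length_cons]; omega

def pvEmitOne (d : PySem.Dict Int Int) (c : Int) (s : PySem.Set Int) : PySem.Dict Int Int :=
  s.foldl (fun rd elem =>
    if !(PySem.Dict.contains rd elem) then PySem.Dict.insert rd elem c else rd) d

def pvEmitList (d : PySem.Dict Int Int) (c : Int) : List (PySem.Set Int) → PySem.Dict Int Int
  | [] => d
  | s :: rest => pvEmitList (pvEmitOne d c s) (c + 1) rest

-- empty intersection = no common element
theorem pv_inter_nil_iff (v k : PySem.Set Int) :
    PySem.Set.inter v k = [] ↔ ∀ x ∈ v, x ∉ k := by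
  simp [PySem.Set.inter, List.filter_eq_nil_iff]

theorem pv_isdisjoint_iff (v : PySem.Set Int) (k : List Int) :
    PySem.Set.isdisjoint v k = true ↔ ∀ x ∈ v, x ∉ k := by
  simp [PySem.Set.isdisjoint]

theorem pv_scanA_none_iff (v : PySem.Set Int) (rest : List (PySem.Set Int)) :
    pvInnerScanA v rest = none ↔ ∀ k ∈ rest, PySem.Set.inter v k = [] := by
  induction rest with
  | nil => simp [pvInnerScanA]
  | cons k ks ih =>
    simp only [pvInnerScanA]
    by_cases hkk : PySem.Set.inter v k = []
    · rw [if_neg (by simp [hkk])]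
      constructor
      · intro h
        have hnone : pvInnerScanA v ks = none := by
          cases hscan : pvInnerScanA v ks with
          | none => rfl
          | some q => rw [hscan] at h; simp at h
        intro k' hk'
        rcases List.mem_cons.mp hk' with h' | h'
        · subst h'; exact hkk
        · exact ih.mp hnone k' h'
      · intro hall
        rw [ih.mpr (fun k' h' => hall k' (List.mem_cons_of_mem _ h'))]
        rfl
    · rw [if_pos (by simpa using hkk)]
      constructor
      · intro h; simp at h
      · intro hall; exact absurd (hall k (by simp)) hkk

theorem pv_scanA_some_mem (v : PySem.Set Int) (rest : List (PySem.Set Int))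
    (p : PySem.Set Int × List (PySem.Set Int)) (h : pvInnerScanA v rest = some p) :
    (∀ x ∈ p.1, x ∈ v ∨ ∃ k ∈ rest, x ∈ k) ∧ (∀ k ∈ p.2, k ∈ rest) := by
  induction rest generalizing p with
  | nil => simp [pvInnerScanA] at h
  | cons k ks ih =>
    simp only [pvInnerScanA] at h
    split at h
    · cases h
      constructor
      · intro x hx
        rcases (PySem.Set.mem_union v k x).mp hx with hx | hx
        · exact Or.inl hx
        · exact Or.inr ⟨k, by simp, hx⟩
      · intro k' hk'; simp [hk']
    · cases hk : pvInnerScanA v ks with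
      | none => rw [hk] at h; cases h
      | some q =>
        rw [hk] at h; cases h
        obtain ⟨hq1, hq2⟩ := ih q hk
        constructor
        · intro x hx
          rcases hq1 x hx with hx | ⟨k', hk', hx⟩
          · exact Or.inl hx
          · exact Or.inr ⟨k', by simp [hk'], hx⟩
        · intro k' hk'
          rcases List.mem_cons.mp hk' with hk' | hk'
          · simp [hk']
          · simp [hq2 k' hk']

-- a set disjoint from every member of rest stays disjoint after one merge step of A
theorem pv_disj_preserved (v : PySem.Set Int) (rest : List (PySem.Set Int)) :
    ∀ r', (∀ k ∈ rest, PySem.Set.inter v k = []) → pvOuterScanA rest = some r' →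
      ∀ k ∈ r', PySem.Set.inter v k = [] := by
  induction rest with
  | nil => intro r' _ h; simp [pvOuterScanA] at h
  | cons w t ih =>
    intro r' hd h
    simp only [pvOuterScanA] at h
    cases hi : pvInnerScanA w t with
    | some q =>
      rw [hi] at h; cases h
      obtain ⟨hq1, hq2⟩ := pv_scanA_some_mem w t q hi
      intro k hk
      rcases List.mem_cons.mp hk with hk | hk
      · subst hk
        rw [pv_inter_nil_iff]
        intro x hx hxk
        rcases hq1 x hxk with hxw | ⟨k', hk', hxk'⟩
        · exact (pv_inter_nil_iff v w).mp (hd w (by simp)) x hx hxw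
        · exact (pv_inter_nil_iff v k').mp (hd k' (List.mem_cons_of_mem w hk')) x hx hxk'
      · exact hd k (List.mem_cons_of_mem w (hq2 k hk))
    | none =>
      rw [hi] at h
      cases ho : pvOuterScanA t with
      | none => rw [ho] at h; cases h
      | some r'' =>
        rw [ho] at h
        simp only [Option.map_some] at h
        injection h with h
        subst h
        intro k hk
        rcases List.mem_cons.mp hk with hk | hk
        · exact hd k (by simp [hk])
        · exact ih r'' (fun k' h' => hd k' (List.mem_cons_of_mem w h')) ho k hk

theorem pv_greedy_fixed (m : List (PySem.Set Int)) (h : pvOuterScanA m = none) :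
    pvGreedy m = m := by
  induction m with
  | nil => rw [pvGreedy]
  | cons v rest ih =>
    simp only [pvOuterScanA] at h
    cases hi : pvInnerScanA v rest with
    | some q => rw [hi] at h; cases h
    | none =>
      rw [hi] at h
      cases ho : pvOuterScanA rest with
      | some r => rw [ho] at h; cases h
      | none =>
        rw [pvGreedy, pvGrowS_none hi]
        rw [ih ho]

-- KEY: one merge step of A does not change the greedy decomposition
theorem pv_greedy_step (m m' : List (PySem.Set Int)) (h : pvOuterScanA m = some m') :
    pvGreedy m' = pvGreedy m := by
  induction hn : m.length using Nat.strong_induction_on generalizing m m' with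
  | _ n ih =>
  subst hn
  cases m with
  | nil => simp [pvOuterScanA] at h
  | cons v rest =>
    simp only [pvOuterScanA] at h
    cases hi : pvInnerScanA v rest with
    | some q =>
      rw [hi] at h; cases h
      rw [pvGreedy, pvGreedy, pvGrowS_some hi]
    | none =>
      rw [hi] at h
      cases ho : pvOuterScanA rest with
      | none => rw [ho] at h; cases h
      | some r' =>
        rw [ho] at h; cases h
        have hd : ∀ k ∈ rest, PySem.Set.inter v k = [] := (pv_scanA_none_iff v rest).mp hi
        have hd' : ∀ k ∈ r', PySem.Set.inter v k = [] := pv_disj_preserved v rest r' hd ho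
        have hi' : pvInnerScanA v r' = none := (pv_scanA_none_iff v r').mpr hd'
        rw [pvGreedy, pvGreedy, pvGrowS_none hi, pvGrowS_none hi']
        have hlen := pvOuterScanA_length rest r' ho
        rw [ih rest.length (by simp) rest r' ho rfl]

theorem pv_findGo_eq_greedy (fuel : Nat) : ∀ m : List (PySem.Set Int), m.length ≤ fuel →
    pvFindIntersectionGo fuel m = pvGreedy m := by
  induction fuel with
  | zero =>
    intro m hm
    have hnil : m = [] := List.eq_nil_of_length_eq_zero (Nat.le_zero.mp hm)
    subst hnil
    rw [pvFindIntersectionGo, pvGreedy]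
  | succ fuel ih =>
    intro m hm
    rw [pvFindIntersectionGo]
    cases ho : pvOuterScanA m with
    | some m' =>
      have := pvOuterScanA_length m m' ho
      show pvFindIntersectionGo fuel m' = pvGreedy m
      rw [ih m' (by omega), pv_greedy_step m m' ho]
    | none => rw [pv_greedy_fixed m ho]

theorem pv_find_eq_greedy (m : List (PySem.Set Int)) :
    pvFindIntersection m = pvGreedy m :=
  pv_findGo_eq_greedy m.length m le_rfl

-- A's enumerate fold is pvEmitList with the counter started one above the start index
theorem pv_enum_fold (comps : List (PySem.Set Int)) (d : PySem.Dict Int Int) (n : Int) :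
    (PySem.List.enumerate comps n).foldl
      (fun rd p =>
        p.2.foldl
          (fun rd elem =>
            if !(PySem.Dict.contains rd elem) then PySem.Dict.insert rd elem (p.1 + 1)
            else rd)
          rd)
      d = pvEmitList d (n + 1) comps := by
  induction comps generalizing d n with
  | nil => rfl
  | cons s rest ih =>
    rw [PySem.List.enumerate_cons, List.foldl_cons, pvEmitList]
    exact ih _ (n + 1)

theorem turn_set_eq_emitList (comps : List (PySem.Set Int)) :
    turn_set_to_mapping_dict comps = pvEmitList PySem.Dict.empty 1 comps := by
  unfold turn_set_to_mapping_dict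
  have := pv_enum_fold comps PySem.Dict.empty 0
  simpa using this

-- B's seen/acc pair fold is the diagonal of Python's set.union
theorem pv_foldpair (t : List Int) (s : List Int) :
    t.foldl (fun (sa : List Int × PySem.Set Int) x =>
        if sa.2.contains x then sa else (sa.1 ++ [x], sa.2.add x)) (s, s) =
      (PySem.Set.union s t, PySem.Set.union s t) := by
  induction t generalizing s with
  | nil => rfl
  | cons x xs ih =>
    rw [List.foldl_cons]
    have hstep : (if PySem.Set.contains s x then ((s, s) : List Int × PySem.Set Int)
        else (s ++ [x], PySem.Set.add s x)) = (PySem.Set.add s x, PySem.Set.add s x) := by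
      have ha : PySem.Set.add s x = if PySem.Set.contains s x then s else s ++ [x] := rfl
      by_cases hc : PySem.Set.contains s x = true
      · rw [if_pos hc, ha, if_pos hc]
      · rw [if_neg hc, ha, if_neg hc]
    show xs.foldl _ (if PySem.Set.contains s x then (s, s) else (s ++ [x], PySem.Set.add s x)) = _
    rw [hstep, ih (PySem.Set.add s x)]
    rfl

-- B's hit index / pop pair is exactly A's inner scan
theorem pv_hit_scan (rest : List (List Int)) (seen : PySem.Set Int) :
    (pvHit seen rest = none ∧ pvInnerScanA seen rest = none) ∨
    (∃ j t rest', pvHit seen rest = some j ∧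
      PySem.List.pop? rest (j : Int) = some (t, rest') ∧
      pvInnerScanA seen rest = some (PySem.Set.union seen t, rest')) := by
  induction rest with
  | nil => exact Or.inl ⟨rfl, rfl⟩
  | cons t ts ih =>
    by_cases hd : PySem.Set.isdisjoint seen t
    · have hnil : PySem.Set.inter seen t = [] :=
        (pv_inter_nil_iff seen t).mpr ((pv_isdisjoint_iff seen t).mp hd)
      rcases ih with ⟨h1, h2⟩ | ⟨j, t', rest', h1, h2, h3⟩
      · refine Or.inl ⟨?_, ?_⟩
        · simp [pvHit, hd, h1]
        · simp [pvInnerScanA, hnil, h2]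
      · refine Or.inr ⟨j + 1, t', t :: rest', ?_, ?_, ?_⟩
        · simp [pvHit, hd, h1]
        · have hj : j < ts.length := pvHit_lt seen ts j h1
          rw [PySem.List.pop?_natCast ts j hj] at h2
          injection h2 with h2
          have hjt : ts[j] = t' := congrArg Prod.fst h2
          have hje : ts.eraseIdx j = rest' := congrArg Prod.snd h2
          have : ((j + 1 : Nat) : Int) = ((j : Nat) : Int) + 1 := by push_cast; ring
          rw [this]
          rw [show ((j : Nat) : Int) + 1 = (((j + 1 : Nat)) : Int) by push_cast; ring]
          rw [PySem.List.pop?_natCast (t :: ts) (j + 1) (by simpa using hj)]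
          simp [hjt, hje]
        · simp [pvInnerScanA, hnil, h3]
    · have hne : PySem.Set.inter seen t ≠ [] := by
        intro hnil
        exact hd ((pv_isdisjoint_iff seen t).mpr ((pv_inter_nil_iff seen t).mp hnil))
      refine Or.inr ⟨0, t, ts, ?_, ?_, ?_⟩
      · simp [pvHit, hd]
      · exact PySem.List.pop?_zero_cons t ts
      · simp [pvInnerScanA, hne]

-- B's inner while loop computes A's grow
theorem pv_growGo_eq_growS (fuel : Nat) : ∀ (rest : List (List Int)) (acc : List Int),
    rest.length ≤ fuel → pvGrowGo fuel acc acc rest = pvGrowS acc rest := by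
  induction fuel with
  | zero =>
    intro rest acc hr
    have hnil : rest = [] := List.eq_nil_of_length_eq_zero (Nat.le_zero.mp hr)
    subst hnil
    rw [pvGrowGo, pvGrowS_none rfl]
  | succ fuel ih =>
    intro rest acc hr
    rw [pvGrowGo]
    rcases pv_hit_scan rest acc with ⟨h1, h2⟩ | ⟨j, t, rest', h1, h2, h3⟩
    · simp only [h1]
      rw [pvGrowS_none h2]
    · simp only [h1, h2]
      rw [pv_foldpair t acc]
      have hlen : rest'.length + 1 = rest.length := PySem.List.length_of_pop?_eq_some rest h2
      rw [ih rest' (PySem.Set.union acc t) (by omega)]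
      rw [pvGrowS_some h3]

theorem pv_grow_eq_growS (rest : List (List Int)) (acc : List Int) :
    pvGrow acc acc rest = pvGrowS acc rest :=
  pv_growGo_eq_growS rest.length rest acc le_rfl

theorem pv_growS_subset (v : PySem.Set Int) (rest : List (PySem.Set Int)) :
    ∀ k ∈ (pvGrowS v rest).2, k ∈ rest := by
  induction v, rest using pvGrowS.induct with
  | case1 v rest p h ih =>
    rw [pvGrowS_some h]
    intro k hk
    exact (pv_scanA_some_mem v rest p h).2 k (ih k hk)
  | case2 v rest h =>
    rw [pvGrowS_none h]
    exact fun k hk => hk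

theorem pv_ofList_nodup_aux (l : List Int) (s : PySem.Set Int)
    (hn : l.Nodup) (hd : ∀ x ∈ l, x ∉ s) : l.foldl PySem.Set.add s = s ++ l := by
  induction l generalizing s with
  | nil => simp
  | cons x xs ih =>
    rw [List.foldl_cons, PySem.Set.add_of_not_mem (hd x (by simp))]
    rw [ih (s ++ [x]) (List.Nodup.of_cons hn)]
    · simp
    · intro y hy hmem
      rcases List.mem_append.mp hmem with hmem | hmem
      · exact hd y (by simp [hy]) hmem
      · simp at hmem
        subst hmem
        exact (List.nodup_cons.mp hn).1 hy

theorem pv_ofList_nodup (l : List Int) (hn : l.Nodup) : PySem.Set.ofList l = l := by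
  have := pv_ofList_nodup_aux l [] hn (by simp)
  simpa [PySem.Set.ofList, PySem.Set.empty] using this

theorem pv_setdefault_eq (d : PySem.Dict Int Int) (k v : Int) :
    PySem.Dict.setdefault d k v =
      if !(PySem.Dict.contains d k) then PySem.Dict.insert d k v else d := by
  by_cases hc : PySem.Dict.contains d k
  · simp [PySem.Dict.setdefault, hc]
  · simp [PySem.Dict.setdefault, PySem.Dict.insert, hc]

-- B's outer while loop is per-component emission over the greedy decomposition
theorem pv_compGo_emit (fuel : Nat) : ∀ (m : List (List Int)) (d : PySem.Dict Int Int) (c : Int),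
    m.length ≤ fuel → (∀ l ∈ m, l.Nodup) →
    pvCompLoopGo fuel d c m = pvEmitList d c (pvGreedy m) := by
  induction fuel with
  | zero =>
    intro m d c hm _
    have hnil : m = [] := List.eq_nil_of_length_eq_zero (Nat.le_zero.mp hm)
    subst hnil
    rw [pvCompLoopGo, pvGreedy]
    rfl
  | succ fuel ih =>
    intro m d c hm hn
    cases m with
    | nil => rw [pvCompLoopGo, pvGreedy]; rfl
    | cons a rest =>
      show pvCompLoopGo fuel
          ((pvGrow a (PySem.Set.ofList a) rest).1.foldl
            (fun d x => PySem.Dict.setdefault d x c) d)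
          (c + 1) (pvGrow a (PySem.Set.ofList a) rest).2 = _
      rw [pv_ofList_nodup a (hn a (by simp))]
      rw [pv_grow_eq_growS rest a]
      have hfold : ∀ (d' : PySem.Dict Int Int) (s : PySem.Set Int),
          s.foldl (fun d x => PySem.Dict.setdefault d x c) d' = pvEmitOne d' c s := by
        intro d' s
        unfold pvEmitOne
        congr 1
        funext rd elem
        exact pv_setdefault_eq rd elem c
      rw [hfold]
      have hsub := pv_growS_subset a rest
      have hlen := pvGrowS_len a rest
      rw [ih (pvGrowS a rest).2 _ (c + 1) (by simp only [List.length_cons] at hm; omega)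
        (fun l hl => hn l (by simp [hsub l hl]))]
      rw [pvGreedy, pvEmitList]

theorem pv_comp_emit (m : List (List Int)) (d : PySem.Dict Int Int) (c : Int)
    (hn : ∀ l ∈ m, l.Nodup) : pvCompLoop d c m = pvEmitList d c (pvGreedy m) :=
  pv_compGo_emit m.length m d c le_rfl hn

theorem get_mapping_dict_spec : Claim_equal_get_mapping_dict := by
  unfold Claim_equal_get_mapping_dict
  intro sp _ _
  unfold Spec_get_mapping_dict get_mapping_dict get_mapping_dict_alt
  simp only []
  rw [PySem.List.foldl_append_singleton_eq_map]
  rw [show (fun i => PySem.List.pyGetD (PySem.List.pyGetD sp i []) 0 []) =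
        (fun l => PySem.List.pyGetD l 0 []) ∘ (fun i => PySem.List.pyGetD sp i []) from rfl]
  rw [← List.map_map, PySem.List.map_pyGetD_pyRange_zero sp []]
  rw [List.nil_append]
  rw [List.filter_map, List.map_map]
  rw [turn_set_eq_emitList, pv_find_eq_greedy]
  rw [pv_comp_emit _ PySem.Dict.empty 1 ?hn]
  case hn =>
    intro l hl
    simp only [List.mem_map] at hl
    obtain ⟨p0, _, hp⟩ := hl
    subst hp
    rw [PySem.List.dedup_eq_ofList]
    exact PySem.Set.nodup_ofList _
  have h1 : ((fun i : List Int => !i.isEmpty) ∘ fun l : List (List Int) => PySem.List.pyGetD l 0 []) =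
      (fun sp : List (List Int) => !(PySem.List.pyGetD sp 0 []).isEmpty) := rfl
  have h2 : (PySem.Set.ofList ∘ fun l : List (List Int) => PySem.List.pyGetD l 0 []) =
      (fun sp : List (List Int) => PySem.List.dedup (PySem.List.pyGetD sp 0 [])) := by
    funext l
    simp [Function.comp, PySem.List.dedup_eq_ofList]
  rw [h1, h2]
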